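-- pv_equiv track=rewrite | github.com/Ag3497120/verantyx-v6 | synth_results/d89b689b.py | transform
-- ===== SOURCE A (Python) =====
-- def transform(grid):
--     rows = len(grid); cols = len(grid[0])
--     flat = [(r,c,grid[r][c]) for r in range(rows) for c in range(cols) if grid[r][c]!=0]
--     block_val = None; block_r = None; block_c = None
--     for r in range(rows-1):
--         for c in range(cols-1):
--             if (grid[r][c]!=0 and grid[r][c]==grid[r+1][c] and
--                 grid[r][c]==grid[r][c+1] and grid[r][c]==grid[r+1][c+1]):
--                 block_val = grid[r][c]; block_r, block_c = r, c; break
--         if block_val: break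
--     singles = [(r,c,v) for r,c,v in flat if v != block_val]
--     corners = [(block_r, block_c), (block_r, block_c+1), (block_r+1, block_c), (block_r+1, block_c+1)]
--     result_vals = [0,0,0,0]
--     for r,c,v in singles:
--         dists = [abs(r-cr)+abs(c-cc) for cr,cc in corners]
--         idx = dists.index(min(dists))
--         result_vals[idx] = v
--     result = [[0]*cols for _ in range(rows)]
--     for i, (cr,cc) in enumerate(corners):
--         result[cr][cc] = result_vals[i]
--     return result
-- ===== SOURCE B (Python) =====
-- def transform(grid):
--     rows = len(grid); cols = len(grid[0])
--     br, bc = next((r, c) for r in range(rows - 1) for c in range(cols - 1)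
--                   if grid[r][c] != 0 and grid[r][c] == grid[r + 1][c]
--                   and grid[r][c] == grid[r][c + 1] and grid[r][c] == grid[r + 1][c + 1])
--     bv = grid[br][bc]
--     result = [[0] * cols for _ in range(rows)]
--     for r in range(rows):
--         for c in range(cols):
--             v = grid[r][c]
--             if v != 0 and v != bv:
--                 result[br if r <= br else br + 1][bc if c <= bc else bc + 1] = v
--     return result
-- ===== Notes on version B (the rewrite author's own statement) =====
-- stated objective: simpler
-- what changed: B replaces A's flat/singles/corners/dists pipeline by a single pass over the cells that computes the nearest corner directly with two comparisons (row: top-or-bottom, column: left-or-right) and writes it straight into the result grid — no intermediate flat/singles lists and no per-cell 4-distance list with argmin — and finds the block with a generator expression instead of break-driven loops.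
import Mathlib
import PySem

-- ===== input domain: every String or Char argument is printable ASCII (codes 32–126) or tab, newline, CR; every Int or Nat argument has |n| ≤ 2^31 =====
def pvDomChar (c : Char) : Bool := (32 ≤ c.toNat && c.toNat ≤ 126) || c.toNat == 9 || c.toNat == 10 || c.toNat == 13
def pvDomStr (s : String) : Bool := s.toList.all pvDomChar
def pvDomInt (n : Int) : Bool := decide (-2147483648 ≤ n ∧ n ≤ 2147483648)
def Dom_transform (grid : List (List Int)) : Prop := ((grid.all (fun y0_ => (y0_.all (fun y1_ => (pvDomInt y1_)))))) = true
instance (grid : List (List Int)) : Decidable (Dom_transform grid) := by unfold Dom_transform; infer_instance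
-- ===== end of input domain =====

-- B replaces A's flat/singles/dists-argmin pipeline by one pass over the cells computing the
-- nearest corner with two comparisons and writing straight into the result grid (objective: simpler).

-- shared small helpers: grid cell access, 2-d write, zero grid, the 2x2-block test
def gAt (grid : List (List Int)) (r c : Nat) : Int := (grid.getD r []).getD c 0

def set2d (G : List (List Int)) (r c : Nat) (v : Int) : List (List Int) :=
  G.set r ((G.getD r []).set c v)

def zeroGrid (rows cols : Nat) : List (List Int) :=
  List.replicate rows (List.replicate cols (0 : Int))

def isBlock (grid : List (List Int)) (r c : Nat) : Bool :=
  gAt grid r c != 0 && gAt grid r c == gAt grid (r+1) c &&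
  gAt grid r c == gAt grid r (c+1) && gAt grid r c == gAt grid (r+1) (c+1)

-- ===== PORT A =====
-- A's break-driven double loop looking for the first 2x2 block (row-major)
def findBlockA (grid : List (List Int)) (rows cols : Nat) : Option (Nat × Nat) :=
  (List.range (rows - 1)).foldl (fun acc r =>
    match acc with
    | some x => some x
    | none => ((List.range (cols - 1)).find? (fun c => isBlock grid r c)).map (fun c => (r, c))) none

def transform (grid : List (List Int)) : List (List Int) :=
  let rows := grid.length
  let cols := (grid.headD []).length
  let flat : List (Nat × Nat × Int) :=
    (List.range rows).flatMap (fun r =>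
      ((List.range cols).filter (fun c => gAt grid r c != 0)).map (fun c => (r, c, gAt grid r c)))
  match findBlockA grid rows cols with
  | none => []   -- Python raises TypeError here (block_r is None); excluded by Pre_transform
  | some (br, bc) =>
    let bv := gAt grid br bc
    let singles := flat.filter (fun t => t.2.2 != bv)
    let corners : List (Nat × Nat) := [(br, bc), (br, bc + 1), (br + 1, bc), (br + 1, bc + 1)]
    let resultVals : List Int := singles.foldl (fun vals t =>
      let dists : List Int := corners.map (fun p => |(t.1 : Int) - (p.1 : Int)| + |(t.2.1 : Int) - (p.2 : Int)|)
      let m := (PySem.List.min? dists (fun x => x)).getD 0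
      let idx := (PySem.List.index? dists m).getD 0
      vals.set idx t.2.2) [0, 0, 0, 0]
    (PySem.List.enumerate corners).foldl
      (fun res p => set2d res p.2.1 p.2.2 ((PySem.List.pyGet? resultVals p.1).getD 0)) (zeroGrid rows cols)

-- ===== PORT B =====
def transform_alt (grid : List (List Int)) : List (List Int) :=
  let rows := grid.length
  let cols := (grid.headD []).length
  match ((List.range (rows - 1)).flatMap (fun r =>
      ((List.range (cols - 1)).filter (fun c => isBlock grid r c)).map (fun c => (r, c)))).head? with
  | none => []   -- Python raises StopIteration here; excluded by Pre_transform
  | some (br, bc) =>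
    let bv := gAt grid br bc
    (List.range rows).foldl (fun res r =>
      (List.range cols).foldl (fun res c =>
        let v := gAt grid r c
        if v != 0 && v != bv then
          set2d res (if r ≤ br then br else br + 1) (if c ≤ bc then bc else bc + 1) v
        else res) res) (zeroGrid rows cols)

-- ===== PRECONDITION & SPEC =====
-- Pre_ excludes exactly the inputs where Python A raises: the empty grid (IndexError on grid[0]),
-- a row shorter than the first row (IndexError), and grids with no 2x2 block (TypeError on None+1).
def Pre_transform (grid : List (List Int)) : Prop :=
  grid ≠ [] ∧ (∀ row ∈ grid, (grid.headD []).length ≤ row.length) ∧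
  ∃ r < grid.length - 1, ∃ c < (grid.headD []).length - 1, isBlock grid r c = true
instance (grid : List (List Int)) : Decidable (Pre_transform grid) := by unfold Pre_transform; infer_instance
def pvWitness_transform : List (List Int) := [[1, 1], [1, 1]]

def Spec_transform (grid : List (List Int)) (out : List (List Int)) : Prop := out = transform_alt grid
instance (grid : List (List Int)) (out : List (List Int)) : Decidable (Spec_transform grid out) := by unfold Spec_transform; infer_instance

-- ===== CLAIM (what is proved, stated in full; the proofs are below) =====
def Claim_equal_transform : Prop := ∀ (grid : List (List Int)), Dom_transform grid → Pre_transform grid → Spec_transform grid (transform grid)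

-- ===== LEMMAS AND PROOFS =====

lemma getD_set_self (l : List (List Int)) (i : Nat) (a : List Int) (h : i < l.length) :
    (l.set i a).getD i [] = a := by
  simp [List.getD, h]

lemma getD_set_ne (l : List (List Int)) (i j : Nat) (a : List Int) (h : i ≠ j) :
    (l.set i a).getD j [] = l.getD j [] := by
  simp [List.getD, List.getElem?_set_ne h]

lemma set2d_oob (G : List (List Int)) (r c : Nat) (v : Int) (h : G.length ≤ r) :
    set2d G r c v = G := by
  unfold set2d; rw [List.set_eq_of_length_le h]

lemma set2d_set2d_same (G : List (List Int)) (r c : Nat) (a v : Int) :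
    set2d (set2d G r c a) r c v = set2d G r c v := by
  by_cases h : r < G.length
  · unfold set2d
    rw [getD_set_self _ _ _ h, List.set_set, List.set_set]
  · have h' : G.length ≤ r := by omega
    rw [set2d_oob G r c a h']

lemma set2d_comm (G : List (List Int)) (r c r' c' : Nat) (a b : Int) (h : r ≠ r' ∨ c ≠ c') :
    set2d (set2d G r c a) r' c' b = set2d (set2d G r' c' b) r c a := by
  by_cases hr : r = r'
  · subst hr
    have hc : c ≠ c' := by tauto
    by_cases hl : r < G.length
    · unfold set2d
      rw [getD_set_self _ _ _ hl, getD_set_self _ _ _ hl, List.set_set, List.set_set,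
        List.set_comm _ _ hc]
    · have h' : G.length ≤ r := by omega
      rw [set2d_oob G r c a h', set2d_oob G r c' b h', set2d_oob G r c a h']
  · unfold set2d
    rw [getD_set_ne _ _ _ _ hr, getD_set_ne _ _ _ _ (Ne.symm hr),
      List.set_comm _ _ hr]

lemma set2d_zero (rows cols r c : Nat) : set2d (zeroGrid rows cols) r c 0 = zeroGrid rows cols := by
  unfold set2d zeroGrid
  by_cases h : r < rows
  · rw [List.getD_eq_getElem _ _ (by simpa using h)]
    simp [List.set_replicate_self]
  · have : (List.replicate rows (List.replicate cols (0:Int))).length ≤ r := by simp; omega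
    rw [List.set_eq_of_length_le this]

def placeC (G : List (List Int)) (br bc : Nat) (a b c d : Int) : List (List Int) :=
  set2d (set2d (set2d (set2d G br bc a) br (bc+1) b) (br+1) bc c) (br+1) (bc+1) d

lemma placeC_w0 (G : List (List Int)) (br bc : Nat) (a b c d v : Int) :
    set2d (placeC G br bc a b c d) br bc v = placeC G br bc v b c d := by
  unfold placeC
  rw [set2d_comm _ (br+1) (bc+1) br bc _ _ (by omega),
      set2d_comm _ (br+1) bc br bc _ _ (by omega),
      set2d_comm _ br (bc+1) br bc _ _ (by omega),
      set2d_set2d_same]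

lemma placeC_w1 (G : List (List Int)) (br bc : Nat) (a b c d v : Int) :
    set2d (placeC G br bc a b c d) br (bc+1) v = placeC G br bc a v c d := by
  unfold placeC
  rw [set2d_comm _ (br+1) (bc+1) br (bc+1) _ _ (by omega),
      set2d_comm _ (br+1) bc br (bc+1) _ _ (by omega),
      set2d_set2d_same]

lemma placeC_w2 (G : List (List Int)) (br bc : Nat) (a b c d v : Int) :
    set2d (placeC G br bc a b c d) (br+1) bc v = placeC G br bc a b v d := by
  unfold placeC
  rw [set2d_comm _ (br+1) (bc+1) (br+1) bc _ _ (by omega),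
      set2d_set2d_same]

lemma placeC_w3 (G : List (List Int)) (br bc : Nat) (a b c d v : Int) :
    set2d (placeC G br bc a b c d) (br+1) (bc+1) v = placeC G br bc a b c v := by
  unfold placeC
  rw [set2d_set2d_same]

lemma placeC_zero (rows cols br bc : Nat) :
    placeC (zeroGrid rows cols) br bc 0 0 0 0 = zeroGrid rows cols := by
  unfold placeC
  rw [set2d_zero, set2d_zero, set2d_zero, set2d_zero]

lemma idx_eval (br bc r c : Nat) (v a b c0 d : Int) :
    (let dists : List Int := [((br:Nat),(bc:Nat)),(br,bc+1),(br+1,bc),(br+1,bc+1)].map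
        (fun p => |(r : Int) - (p.1 : Int)| + |(c : Int) - (p.2 : Int)|)
     let m := (PySem.List.min? dists (fun x => x)).getD 0
     let idx := (PySem.List.index? dists m).getD 0
     [a, b, c0, d].set idx v)
    = if r ≤ br then (if c ≤ bc then [v,b,c0,d] else [a,v,c0,d])
      else (if c ≤ bc then [a,b,v,d] else [a,b,c0,v]) := by
  simp only [List.map_cons, List.map_nil, PySem.List.min?_id_cons, List.foldl_cons, List.foldl_nil,
    Option.getD_some]
  set D0 : Int := |(r : Int) - ((br:Nat) : Int)| + |(c : Int) - ((bc:Nat) : Int)| with hD0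
  set D1 : Int := |(r : Int) - ((br:Nat) : Int)| + |(c : Int) - ((bc+1:Nat) : Int)| with hD1
  set D2 : Int := |(r : Int) - ((br+1:Nat) : Int)| + |(c : Int) - ((bc:Nat) : Int)| with hD2
  set D3 : Int := |(r : Int) - ((br+1:Nat) : Int)| + |(c : Int) - ((bc+1:Nat) : Int)| with hD3
  by_cases hr : r ≤ br <;> by_cases hc : c ≤ bc <;> simp only [hr, hc, if_true, if_false]
  · have hr' : (r:Int) ≤ (br:Int) := by exact_mod_cast hr
    have hc' : (c:Int) ≤ (bc:Int) := by exact_mod_cast hc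
    have ar0 : |(r : Int) - ((br:Nat) : Int)| = (br:Int) - r := by
      rw [abs_sub_comm, abs_of_nonneg (by omega)]
    have ar1 : |(r : Int) - ((br+1:Nat) : Int)| = (br:Int) + 1 - r := by
      push_cast; rw [abs_sub_comm, abs_of_nonneg (by omega)]
    have ac0 : |(c : Int) - ((bc:Nat) : Int)| = (bc:Int) - c := by
      rw [abs_sub_comm, abs_of_nonneg (by omega)]
    have ac1 : |(c : Int) - ((bc+1:Nat) : Int)| = (bc:Int) + 1 - c := by
      push_cast; rw [abs_sub_comm, abs_of_nonneg (by omega)]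
    have e1 : D1 = D0 + 1 := by rw [hD0, hD1, ar0, ac0, ac1]; ring
    have e2 : D2 = D0 + 1 := by rw [hD0, hD2, ar0, ar1, ac0]; ring
    have e3 : D3 = D0 + 2 := by rw [hD0, hD3, ar0, ar1, ac0, ac1]; ring
    rw [e1, e2, e3]
    have hm : min (min (min D0 (D0+1)) (D0+1)) (D0+2) = D0 := by omega
    rw [hm, PySem.List.index?_cons_self]
    rfl
  · have hr' : (r:Int) ≤ (br:Int) := by exact_mod_cast hr
    have hc' : (bc:Int) + 1 ≤ (c:Int) := by
      have : bc + 1 ≤ c := by omega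
      exact_mod_cast this
    have ar0 : |(r : Int) - ((br:Nat) : Int)| = (br:Int) - r := by
      rw [abs_sub_comm, abs_of_nonneg (by omega)]
    have ar1 : |(r : Int) - ((br+1:Nat) : Int)| = (br:Int) + 1 - r := by
      push_cast; rw [abs_sub_comm, abs_of_nonneg (by omega)]
    have ac0 : |(c : Int) - ((bc:Nat) : Int)| = (c:Int) - bc := by
      rw [abs_of_nonneg (by omega)]
    have ac1 : |(c : Int) - ((bc+1:Nat) : Int)| = (c:Int) - (bc + 1) := by
      push_cast; rw [abs_of_nonneg (by omega)]
    have e0 : D0 = D1 + 1 := by rw [hD0, hD1, ar0, ac0, ac1]; ring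
    have e2 : D2 = D1 + 2 := by rw [hD1, hD2, ar0, ar1, ac0, ac1]; ring
    have e3 : D3 = D1 + 1 := by rw [hD1, hD3, ar0, ar1, ac1]; ring
    rw [e0, e2, e3]
    have hm : min (min (min (D1+1) D1) (D1+2)) (D1+1) = D1 := by omega
    rw [hm, PySem.List.index?_cons_of_ne _ (by omega), PySem.List.index?_cons_self]
    rfl
  · have hr' : (br:Int) + 1 ≤ (r:Int) := by
      have : br + 1 ≤ r := by omega
      exact_mod_cast this
    have hc' : (c:Int) ≤ (bc:Int) := by exact_mod_cast hc
    have ar0 : |(r : Int) - ((br:Nat) : Int)| = (r:Int) - br := by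
      rw [abs_of_nonneg (by omega)]
    have ar1 : |(r : Int) - ((br+1:Nat) : Int)| = (r:Int) - (br + 1) := by
      push_cast; rw [abs_of_nonneg (by omega)]
    have ac0 : |(c : Int) - ((bc:Nat) : Int)| = (bc:Int) - c := by
      rw [abs_sub_comm, abs_of_nonneg (by omega)]
    have ac1 : |(c : Int) - ((bc+1:Nat) : Int)| = (bc:Int) + 1 - c := by
      push_cast; rw [abs_sub_comm, abs_of_nonneg (by omega)]
    have e0 : D0 = D2 + 1 := by rw [hD0, hD2, ar0, ar1, ac0]; ring
    have e1 : D1 = D2 + 2 := by rw [hD1, hD2, ar0, ar1, ac0, ac1]; ring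
    have e3 : D3 = D2 + 1 := by rw [hD2, hD3, ar1, ac0, ac1]; ring
    rw [e0, e1, e3]
    have hm : min (min (min (D2+1) (D2+2)) D2) (D2+1) = D2 := by omega
    rw [hm, PySem.List.index?_cons_of_ne _ (by omega),
      PySem.List.index?_cons_of_ne _ (by omega), PySem.List.index?_cons_self]
    rfl
  · have hr' : (br:Int) + 1 ≤ (r:Int) := by
      have : br + 1 ≤ r := by omega
      exact_mod_cast this
    have hc' : (bc:Int) + 1 ≤ (c:Int) := by
      have : bc + 1 ≤ c := by omega
      exact_mod_cast this
    have ar0 : |(r : Int) - ((br:Nat) : Int)| = (r:Int) - br := by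
      rw [abs_of_nonneg (by omega)]
    have ar1 : |(r : Int) - ((br+1:Nat) : Int)| = (r:Int) - (br + 1) := by
      push_cast; rw [abs_of_nonneg (by omega)]
    have ac0 : |(c : Int) - ((bc:Nat) : Int)| = (c:Int) - bc := by
      rw [abs_of_nonneg (by omega)]
    have ac1 : |(c : Int) - ((bc+1:Nat) : Int)| = (c:Int) - (bc + 1) := by
      push_cast; rw [abs_of_nonneg (by omega)]
    have e0 : D0 = D3 + 2 := by rw [hD0, hD3, ar0, ar1, ac0, ac1]; ring
    have e1 : D1 = D3 + 1 := by rw [hD1, hD3, ar0, ar1, ac1]; ring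
    have e2 : D2 = D3 + 1 := by rw [hD2, hD3, ar1, ac0, ac1]; ring
    rw [e0, e1, e2]
    have hm : min (min (min (D3+2) (D3+1)) (D3+1)) D3 = D3 := by omega
    rw [hm, PySem.List.index?_cons_of_ne _ (by omega),
      PySem.List.index?_cons_of_ne _ (by omega),
      PySem.List.index?_cons_of_ne _ (by omega), PySem.List.index?_cons_self]
    rfl




lemma foldl_break_some {α : Type} (l : List α) (f : α → Option (Nat × Nat)) (x : Nat × Nat) :
    l.foldl (fun acc r => match acc with | some y => some y | none => f r) (some x) = some x := by
  induction l with
  | nil => rfl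
  | cons a t ih => simpa using ih

lemma break_head {α : Type} (l : List α) (g : α → List (Nat × Nat)) :
    l.foldl (fun acc r => match acc with | some y => some y | none => (g r).head?) none
      = (l.flatMap g).head? := by
  induction l with
  | nil => rfl
  | cons a t ih =>
    simp only [List.foldl_cons, List.flatMap_cons]
    cases hga : g a with
    | nil => simpa using ih
    | cons x xs => simp [foldl_break_some]

lemma findBlockA_eq (grid : List (List Int)) (rows cols : Nat) :
    findBlockA grid rows cols
      = ((List.range (rows - 1)).flatMap (fun r =>
          ((List.range (cols - 1)).filter (fun c => isBlock grid r c)).map (fun c => (r, c)))).head? := by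
  unfold findBlockA
  rw [← break_head]
  congr 1
  funext acc r
  cases acc with
  | some y => rfl
  | none => rw [List.head?_map, ← List.head?_filter]

lemma pyGetD_nat (l : List Int) (i : Nat) :
    (PySem.List.pyGet? l ((i:Nat):Int)).getD 0 = l.getD i 0 := by
  rw [PySem.List.pyGet?_natCast, List.getD_eq_getElem?_getD]

lemma pg0 (l : List Int) : (PySem.List.pyGet? l 0).getD 0 = l.getD 0 0 := by
  simpa using pyGetD_nat l 0
lemma pg1 (l : List Int) : (PySem.List.pyGet? l (0+1)).getD 0 = l.getD 1 0 := by
  rw [show (0+1:Int) = ((1:Nat):Int) from by norm_num, pyGetD_nat]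
lemma pg2 (l : List Int) : (PySem.List.pyGet? l (0+1+1)).getD 0 = l.getD 2 0 := by
  rw [show (0+1+1:Int) = ((2:Nat):Int) from by norm_num, pyGetD_nat]
lemma pg3 (l : List Int) : (PySem.List.pyGet? l (0+1+1+1)).getD 0 = l.getD 3 0 := by
  rw [show (0+1+1+1:Int) = ((3:Nat):Int) from by norm_num, pyGetD_nat]

lemma master (grid : List (List Int)) (br bc : Nat) (L : List (Nat × Nat)) :
    ∀ (G : List (List Int)) (a b c d : Int),
      L.foldl (fun res p =>
          set2d res (if p.1 ≤ br then br else br + 1) (if p.2 ≤ bc then bc else bc + 1)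
            (gAt grid p.1 p.2)) (placeC G br bc a b c d)
      = placeC G br bc
          ((L.foldl (fun vals p =>
              (let dists : List Int := [((br:Nat),(bc:Nat)),(br,bc+1),(br+1,bc),(br+1,bc+1)].map
                  (fun q => |(p.1 : Int) - (q.1 : Int)| + |(p.2 : Int) - (q.2 : Int)|)
               let m := (PySem.List.min? dists (fun x => x)).getD 0
               let idx := (PySem.List.index? dists m).getD 0
               vals.set idx (gAt grid p.1 p.2))) [a, b, c, d]).getD 0 0)
          ((L.foldl (fun vals p =>
              (let dists : List Int := [((br:Nat),(bc:Nat)),(br,bc+1),(br+1,bc),(br+1,bc+1)].map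
                  (fun q => |(p.1 : Int) - (q.1 : Int)| + |(p.2 : Int) - (q.2 : Int)|)
               let m := (PySem.List.min? dists (fun x => x)).getD 0
               let idx := (PySem.List.index? dists m).getD 0
               vals.set idx (gAt grid p.1 p.2))) [a, b, c, d]).getD 1 0)
          ((L.foldl (fun vals p =>
              (let dists : List Int := [((br:Nat),(bc:Nat)),(br,bc+1),(br+1,bc),(br+1,bc+1)].map
                  (fun q => |(p.1 : Int) - (q.1 : Int)| + |(p.2 : Int) - (q.2 : Int)|)
               let m := (PySem.List.min? dists (fun x => x)).getD 0
               let idx := (PySem.List.index? dists m).getD 0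
               vals.set idx (gAt grid p.1 p.2))) [a, b, c, d]).getD 2 0)
          ((L.foldl (fun vals p =>
              (let dists : List Int := [((br:Nat),(bc:Nat)),(br,bc+1),(br+1,bc),(br+1,bc+1)].map
                  (fun q => |(p.1 : Int) - (q.1 : Int)| + |(p.2 : Int) - (q.2 : Int)|)
               let m := (PySem.List.min? dists (fun x => x)).getD 0
               let idx := (PySem.List.index? dists m).getD 0
               vals.set idx (gAt grid p.1 p.2))) [a, b, c, d]).getD 3 0) := by
  induction L with
  | nil => intro G a b c d; simp [List.foldl_nil]
  | cons p t ih =>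
    intro G a b c d
    simp only [List.foldl_cons]
    rw [idx_eval br bc p.1 p.2 (gAt grid p.1 p.2) a b c d]
    by_cases hr : p.1 ≤ br <;> by_cases hc : p.2 ≤ bc <;>
      simp only [hr, hc, if_true, if_false]
    · rw [placeC_w0]; exact ih G (gAt grid p.1 p.2) b c d
    · rw [placeC_w1]; exact ih G a (gAt grid p.1 p.2) c d
    · rw [placeC_w2]; exact ih G a b (gAt grid p.1 p.2) d
    · rw [placeC_w3]; exact ih G a b c (gAt grid p.1 p.2)

-- ===== VERDICT (by name: the statement is the Claim_ definition above) =====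
theorem transform_spec : Claim_equal_transform := by
  intro grid _ _
  unfold Spec_transform transform transform_alt
  simp only [findBlockA_eq]
  cases hB : ((List.range (grid.length - 1)).flatMap (fun r =>
      ((List.range ((grid.headD []).length - 1)).filter (fun c => isBlock grid r c)).map
        (fun c => (r, c)))).head? with
  | none => rfl
  | some pr =>
    obtain ⟨br, bc⟩ := pr
    simp only [PySem.List.enumerate_cons, PySem.List.enumerate_nil, List.foldl_cons, List.foldl_nil]
    have hsingles :
        (List.filter (fun t => t.2.2 != gAt grid br bc)
          (List.flatMap
            (fun r =>
              List.map (fun c => (r, c, gAt grid r c))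
                (List.filter (fun c => gAt grid r c != 0) (List.range (grid.headD []).length)))
            (List.range grid.length)))
        = (List.filter (fun p => gAt grid p.1 p.2 != 0 && gAt grid p.1 p.2 != gAt grid br bc)
            (List.flatMap (fun r => List.map (fun c => (r, c)) (List.range (grid.headD []).length))
              (List.range grid.length))).map (fun p => (p.1, p.2, gAt grid p.1 p.2)) := by
      simp only [List.filter_flatMap, List.map_flatMap, List.filter_map, List.map_map,
        List.filter_filter, Function.comp_def]
      congr 1
      funext r
      congr 1
      apply List.filter_congr
      intro c _
      exact Bool.and_comm ..
    rw [hsingles, List.foldl_map]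
    simp only [pg0, pg1, pg2, pg3]
    have hb :
        List.foldl (fun res p =>
            set2d res (if p.1 ≤ br then br else br + 1) (if p.2 ≤ bc then bc else bc + 1)
              (gAt grid p.1 p.2))
          (zeroGrid grid.length (grid.headD []).length)
          (List.filter (fun p => gAt grid p.1 p.2 != 0 && gAt grid p.1 p.2 != gAt grid br bc)
            (List.flatMap (fun r => List.map (fun c => (r, c)) (List.range (grid.headD []).length))
              (List.range grid.length)))
        = List.foldl (fun res r =>
            List.foldl (fun res c =>
              if (gAt grid r c != 0 && gAt grid r c != gAt grid br bc) = true then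
                set2d res (if r ≤ br then br else br + 1) (if c ≤ bc then bc else bc + 1)
                  (gAt grid r c)
              else res) res (List.range (grid.headD []).length))
          (zeroGrid grid.length (grid.headD []).length) (List.range grid.length) := by
      rw [← PySem.List.foldl_if_eq_foldl_filter, List.foldl_flatMap]
      simp only [List.foldl_map]
    rw [← hb]
    conv_rhs => rw [← placeC_zero grid.length (grid.headD []).length br bc, master]
    rfl
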